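-- pv_equiv track=rewrite | github.com/patrickstarpty/symphony | .github/skills/qa/selecting-regressions/scripts/dependency-graph-walker.py | walk_graph
-- ===== SOURCE A (Python) =====
-- from collections import deque
--
-- def normalize_path(path: str) -> str:
--     """Normalize paths for consistent lookup."""
--     return path.lstrip('./').rstrip('/')
--
-- def walk_graph(affected: list, graph: dict, max_depth: int = 3) -> set:
--     """BFS walk of dependency graph to find transitive dependencies."""
--     if not graph:
--         return set(affected)
--
--     visited = set(affected)
--     queue = deque(affected)
--     depth = {node: 0 for node in affected}
--
--     while queue:
--         current = queue.popleft()
--         current_depth = depth.get(current, 0)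
--
--         if current_depth >= max_depth:
--             continue
--
--         # Find modules that import current module
--         dependents = graph.get(normalize_path(current), {}).get('imported_by', [])
--
--         for dep in dependents:
--             if dep not in visited:
--                 visited.add(dep)
--                 queue.append(dep)
--                 depth[dep] = current_depth + 1
--
--     return visited
-- ===== SOURCE B (Python) =====
-- def normalize_path(path: str) -> str:
--     """Normalize paths for consistent lookup."""
--     return path.lstrip('./').rstrip('/')
--
-- def walk_graph(affected: list, graph: dict, max_depth: int = 3) -> set:
--     """Level-synchronized BFS: expand one whole depth level per round,
--     for max_depth rounds, without a queue or per-node depth dict."""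
--     if not graph:
--         return set(affected)
--
--     visited = set(affected)
--     frontier = list(affected)
--     for _ in range(max_depth):
--         next_frontier = []
--         for node in frontier:
--             for dep in graph.get(normalize_path(node), {}).get('imported_by', []):
--                 if dep not in visited:
--                     visited.add(dep)
--                     next_frontier.append(dep)
--         if not next_frontier:
--             break
--         frontier = next_frontier
--     return visited
-- ===== Notes on version B (the rewrite author's own statement) =====
-- stated objective: simpler
-- what changed: Replaces the deque/visited/per-node-depth-dict BFS with a level-synchronized BFS: a plain frontier list is expanded whole-level-at-a-time for max_depth rounds, so the deque and the depth dictionary disappear entirely.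
import Mathlib
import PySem

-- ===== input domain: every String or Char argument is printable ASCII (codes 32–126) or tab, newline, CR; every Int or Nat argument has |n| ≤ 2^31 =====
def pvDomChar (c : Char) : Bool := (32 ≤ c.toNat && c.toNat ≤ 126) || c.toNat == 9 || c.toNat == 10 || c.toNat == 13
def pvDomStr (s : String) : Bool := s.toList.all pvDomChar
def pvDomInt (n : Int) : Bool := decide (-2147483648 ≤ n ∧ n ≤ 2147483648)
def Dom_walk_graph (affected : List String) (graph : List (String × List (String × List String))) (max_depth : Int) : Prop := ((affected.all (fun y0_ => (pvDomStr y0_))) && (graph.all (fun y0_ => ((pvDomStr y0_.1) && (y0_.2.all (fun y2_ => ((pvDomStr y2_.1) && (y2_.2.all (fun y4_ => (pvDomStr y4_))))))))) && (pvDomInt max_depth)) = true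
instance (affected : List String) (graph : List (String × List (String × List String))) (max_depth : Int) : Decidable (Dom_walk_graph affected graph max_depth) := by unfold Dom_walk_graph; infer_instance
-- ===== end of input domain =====

-- B replaces A's deque/per-node-depth-dict BFS by a level-synchronized BFS (whole frontier expanded
-- per round, max_depth rounds); equal return value proved on all inputs (objective: simpler).

abbrev PvGraph := List (String × List (String × List String))

-- ===== PORT A =====
-- path.lstrip('./').rstrip('/'): hand port, exact — lstrip(chars)/rstrip(chars) drop the
-- leading/trailing characters belonging to the given set.
def normalize_path (path : String) : String :=
  String.ofList (((path.toList.dropWhile (fun c => c == '.' || c == '/')).reverse.dropWhile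
      (fun c => c == '/')).reverse)

-- graph.get(normalize_path(node), {}).get('imported_by', []) (used verbatim by both programs)
def depsOf (graph : PvGraph) (node : String) : List String :=
  match (PySem.Dict.mk graph).get? (normalize_path node) with
  | none => []
  | some d => (PySem.Dict.mk d).getD "imported_by" []

-- body of A's inner 'for dep in dependents' loop; state = (visited, queue-after-popleft, depth)
def aStep (d1 : Int) (s : PySem.Set String × List String × PySem.Dict String Int) (dep : String) :
    PySem.Set String × List String × PySem.Dict String Int :=
  if !(PySem.Set.contains s.1 dep) then
    (PySem.Set.add s.1 dep, s.2.1 ++ [dep], s.2.2.insert dep d1)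
  else s

-- all strings occurring in any inner value list of graph (only used for A's fuel bound)
def allDeps (graph : PvGraph) : List String :=
  graph.flatMap (fun e => e.2.flatMap (fun kv => kv.2))

-- A's 'while queue' loop. Fuel only makes the recursion structural: one unit per popleft, and the
-- caller passes len(affected) + len(allDeps) + 1, an upper bound on the total number of pops
-- (every push beyond the initial queue adds a fresh element of some dependents list to visited).
def walkLoop (graph : PvGraph) (md : Int) :
    Nat → PySem.Set String → List String → PySem.Dict String Int → PySem.Set String
  | _, visited, [], _ => visited
  | 0, visited, _ :: _, _ => visited
  | fuel + 1, visited, current :: rest, depth =>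
    let d := depth.getD current 0
    if d ≥ md then walkLoop graph md fuel visited rest depth
    else
      let st := (depsOf graph current).foldl (aStep (d + 1)) (visited, rest, depth)
      walkLoop graph md fuel st.1 st.2.1 st.2.2

def walk_graph (affected : List String) (graph : PvGraph) (max_depth : Int) : List String :=
  if graph = [] then PySem.Set.ofList affected
  else
    let visited := PySem.Set.ofList affected
    let depth := affected.foldl (fun d node => d.insert node (0 : Int)) PySem.Dict.empty
    walkLoop graph max_depth (affected.length + (allDeps graph).length + 1) visited affected depth

-- ===== PORT B =====
-- body of B's inner 'for dep in …' loop; state = (visited, next_frontier)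
def bStep (s : PySem.Set String × List String) (dep : String) : PySem.Set String × List String :=
  if !(PySem.Set.contains s.1 dep) then (PySem.Set.add s.1 dep, s.2 ++ [dep]) else s

-- B's 'for node in frontier' body
def expandNode (graph : PvGraph) (s : PySem.Set String × List String) (node : String) :
    PySem.Set String × List String :=
  (depsOf graph node).foldl bStep s

-- B's 'for _ in range(max_depth)' loop with the early break
def levelLoop (graph : PvGraph) : Nat → PySem.Set String → List String → PySem.Set String
  | 0, visited, _ => visited
  | n + 1, visited, frontier =>
    let st := frontier.foldl (expandNode graph) (visited, ([] : List String))
    if st.2 = [] then st.1 else levelLoop graph n st.1 st.2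

def walk_graph_alt (affected : List String) (graph : PvGraph) (max_depth : Int) : List String :=
  if graph = [] then PySem.Set.ofList affected
  else levelLoop graph max_depth.toNat (PySem.Set.ofList affected) affected

-- ===== PRECONDITION & SPEC =====
def Spec_walk_graph (affected : List String) (graph : List (String × List (String × List String))) (max_depth : Int) (out : List String) : Prop := out = walk_graph_alt affected graph max_depth
instance (affected : List String) (graph : List (String × List (String × List String))) (max_depth : Int) (out : List String) : Decidable (Spec_walk_graph affected graph max_depth out) := by unfold Spec_walk_graph; infer_instance

-- ===== CLAIM (what is proved, stated in full; the proofs are below) =====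
def Claim_equal_walk_graph : Prop := ∀ (affected : List String) (graph : List (String × List (String × List String))) (max_depth : Int), Dom_walk_graph affected graph max_depth → Spec_walk_graph affected graph max_depth (walk_graph affected graph max_depth)

-- ===== LEMMAS AND PROOFS =====

-- every dependents list drawn from graph is contained in allDeps graph
theorem get?_mk_mem {α β : Type} [BEq α] [LawfulBEq α] (l : List (α × β)) (k : α) (v : β)
    (h : (PySem.Dict.mk l).get? k = some v) : ∃ p ∈ l, p.2 = v := by
  induction l with
  | nil => simp [PySem.Dict.get?] at h
  | cons p rest ih =>
    rw [show p = (p.1, p.2) from rfl, PySem.Dict.get?_mk_cons] at h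
    by_cases hb : p.1 == k
    · simp [hb] at h; exact ⟨p, by simp, h⟩
    · simp [hb] at h
      obtain ⟨q, hq, hv⟩ := ih h
      exact ⟨q, by simp [hq], hv⟩

theorem getD_mk_mem {α β : Type} [BEq α] [LawfulBEq α] (l : List (α × List β)) (k : α) (x : β)
    (h : x ∈ (PySem.Dict.mk l).getD k []) : ∃ p ∈ l, x ∈ p.2 := by
  rw [PySem.Dict.getD_eq_get?_getD] at h
  cases hg : (PySem.Dict.mk l).get? k with
  | none => rw [hg] at h; simp at h
  | some v =>
    rw [hg] at h; simp at h
    obtain ⟨p, hp, hv⟩ := get?_mk_mem l k v hg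
    exact ⟨p, hp, hv ▸ h⟩

theorem depsOf_subset (graph : PvGraph) (node : String) :
    ∀ x ∈ depsOf graph node, x ∈ allDeps graph := by
  intro x hx
  unfold depsOf at hx
  cases hg : (PySem.Dict.mk graph).get? (normalize_path node) with
  | none => rw [hg] at hx; simp at hx
  | some d =>
    rw [hg] at hx
    obtain ⟨kv, hkv, hxkv⟩ := getD_mk_mem d "imported_by" x hx
    obtain ⟨e, he, hed⟩ := get?_mk_mem graph (normalize_path node) d hg
    simp only [allDeps, List.mem_flatMap]
    exact ⟨e, he, kv, hed ▸ hkv, hxkv⟩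

-- one dependents list processed by A's inner loop and by B's inner loop in lockstep:
-- the same fresh suffix δ is appended to visited / to the queue / to next_frontier, and the
-- depth dict gains exactly the keys δ at value d1, no existing-key entry changing.
theorem innerBoth (deps : List String) (v : PySem.Set String) (a q : List String)
    (dp : PySem.Dict String Int) (d1 : Int) :
    ∃ δ dp',
      deps.foldl bStep (v, a) = (v ++ δ, a ++ δ) ∧
      deps.foldl (aStep d1) (v, q, dp) = (v ++ δ, q ++ δ, dp') ∧
      δ.Nodup ∧ (∀ x ∈ δ, x ∉ v ∧ x ∈ deps) ∧
      (∀ x c, x ∈ v → dp'.getD x c = dp.getD x c) ∧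
      (∀ x ∈ δ, dp'.getD x 0 = d1) := by
  induction deps generalizing v a q dp with
  | nil => exact ⟨[], dp, by simp, by simp, by simp, by simp, fun x c _ => rfl, by simp⟩
  | cons dep deps ih =>
    by_cases hd : dep ∈ v
    · obtain ⟨δ, dp', hB, hA, hnd, hfr, hpres, hnew⟩ := ih v a q dp
      refine ⟨δ, dp', ?_, ?_, hnd, ?_, hpres, hnew⟩
      · rw [List.foldl_cons, show bStep (v, a) dep = (v, a) by simp [bStep, hd], hB]
      · rw [List.foldl_cons, show aStep d1 (v, q, dp) dep = (v, q, dp) by simp [aStep, hd], hA]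
      · exact fun x hx => ⟨(hfr x hx).1, List.mem_cons_of_mem _ (hfr x hx).2⟩
    · have hadd : PySem.Set.add v dep = v ++ [dep] := PySem.Set.add_of_not_mem hd
      obtain ⟨δ, dp', hB, hA, hnd, hfr, hpres, hnew⟩ :=
        ih (v ++ [dep]) (a ++ [dep]) (q ++ [dep]) (dp.insert dep d1)
      have hdep_mem : dep ∈ v ++ [dep] := by simp
      refine ⟨dep :: δ, dp', ?_, ?_, ?_, ?_, ?_, ?_⟩
      · rw [List.foldl_cons,
          show bStep (v, a) dep = (v ++ [dep], a ++ [dep]) by simp [bStep, hd], hB]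
        simp
      · rw [List.foldl_cons,
          show aStep d1 (v, q, dp) dep = (v ++ [dep], q ++ [dep], dp.insert dep d1) by
            simp [aStep, hd], hA]
        simp
      · exact List.nodup_cons.2 ⟨fun h => (hfr dep h).1 hdep_mem, hnd⟩
      · intro x hx
        rcases List.mem_cons.1 hx with rfl | hx'
        · exact ⟨hd, List.mem_cons_self⟩
        · exact ⟨fun hv => (hfr x hx').1 (by simp [hv]), List.mem_cons_of_mem _ (hfr x hx').2⟩
      · intro x c hxv
        have hne : x ≠ dep := fun h => hd (h ▸ hxv)
        rw [hpres x c (by simp [hxv]), PySem.Dict.getD_insert]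
        simp [hne]
      · intro x hx
        rcases List.mem_cons.1 hx with rfl | hx'
        · rw [hpres x 0 hdep_mem, PySem.Dict.getD_insert_self]
        · exact hnew x hx'

-- one whole BFS level: A working through front (all at depth k < md) with acc pending behind it
-- equals B's fold of expandNode over front, and leaves a queue of depth-(k+1) nodes.
theorem levelStep (graph : PvGraph) (md k : Int) (hk : k < md) :
    ∀ (front : List String) (fuel : Nat) (v : PySem.Set String) (acc : List String)
      (dp : PySem.Dict String Int),
    (∀ x ∈ front, x ∈ v ∧ dp.getD x 0 = k) →
    (∀ x ∈ acc, x ∈ v ∧ dp.getD x 0 = k + 1) →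
    ∃ Δ dp',
      front.foldl (expandNode graph) (v, acc) = (v ++ Δ, acc ++ Δ) ∧
      walkLoop graph md (front.length + fuel) v (front ++ acc) dp
        = walkLoop graph md fuel (v ++ Δ) (acc ++ Δ) dp' ∧
      Δ.Nodup ∧ (∀ x ∈ Δ, x ∉ v ∧ x ∈ allDeps graph) ∧
      (∀ x ∈ acc ++ Δ, dp'.getD x 0 = k + 1) := by
  intro front
  induction front with
  | nil =>
    intro fuel v acc dp _ hacc
    refine ⟨[], dp, by simp, by simp, by simp, by simp, ?_⟩
    intro x hx
    exact (hacc x (by simpa using hx)).2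
  | cons c front' ih =>
    intro fuel v acc dp hfront hacc
    have hcv : c ∈ v := (hfront c (by simp)).1
    have hdc : dp.getD c 0 = k := (hfront c (by simp)).2
    obtain ⟨δ, dp₁, hB1, hA1, hnd1, hfr1, hpres1, hnew1⟩ :=
      innerBoth (depsOf graph c) v acc (front' ++ acc) dp (k + 1)
    have hstep : walkLoop graph md ((c :: front').length + fuel) v ((c :: front') ++ acc) dp
        = walkLoop graph md (front'.length + fuel) (v ++ δ) (front' ++ (acc ++ δ)) dp₁ := by
      have hlen : (c :: front').length + fuel = (front'.length + fuel) + 1 := by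
        simp [List.length_cons]; omega
      rw [hlen, show (c :: front') ++ acc = c :: (front' ++ acc) from rfl, walkLoop]
      simp only [hdc, ge_iff_le]
      rw [if_neg (not_le.2 hk)]
      simp only [hA1]
      simp [List.append_assoc]
    have hfront' : ∀ x ∈ front', x ∈ v ++ δ ∧ dp₁.getD x 0 = k := by
      intro x hx
      have h := hfront x (List.mem_cons_of_mem _ hx)
      exact ⟨List.mem_append_left _ h.1, by rw [hpres1 x 0 h.1]; exact h.2⟩
    have hacc' : ∀ x ∈ acc ++ δ, x ∈ v ++ δ ∧ dp₁.getD x 0 = k + 1 := by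
      intro x hx
      rcases List.mem_append.1 hx with hxa | hxd
      · have h := hacc x hxa
        exact ⟨List.mem_append_left _ h.1, by rw [hpres1 x 0 h.1]; exact h.2⟩
      · exact ⟨List.mem_append_right _ hxd, hnew1 x hxd⟩
    obtain ⟨Δ', dp', hB2, hA2, hnd2, hfr2, hdep2⟩ := ih fuel (v ++ δ) (acc ++ δ) dp₁ hfront' hacc'
    have hdisj : ∀ x ∈ δ, x ∉ Δ' := fun x hx hx' =>
      (hfr2 x hx').1 (List.mem_append_right _ hx)
    refine ⟨δ ++ Δ', dp', ?_, ?_, ?_, ?_, ?_⟩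
    · rw [List.foldl_cons,
        show expandNode graph (v, acc) c = (v ++ δ, acc ++ δ) from hB1, hB2]
      simp [List.append_assoc]
    · rw [hstep, hA2]; simp [List.append_assoc]
    · exact List.Nodup.append hnd1 hnd2 hdisj
    · intro x hx
      rcases List.mem_append.1 hx with hxd | hxD
      · exact ⟨(hfr1 x hxd).1, depsOf_subset graph c x (hfr1 x hxd).2⟩
      · exact ⟨fun hv => (hfr2 x hxD).1 (List.mem_append_left _ hv), (hfr2 x hxD).2⟩
    · intro x hx
      apply hdep2
      rw [List.append_assoc]
      exact hx

-- once every queued node sits at depth ≥ md, A only drains the queue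
theorem skipAll (graph : PvGraph) (md : Int) :
    ∀ (queue : List String) (fuel : Nat) (v : PySem.Set String) (dp : PySem.Dict String Int),
    (∀ x ∈ queue, md ≤ dp.getD x 0) → queue.length ≤ fuel →
    walkLoop graph md fuel v queue dp = v := by
  intro queue
  induction queue with
  | nil => intro fuel v dp _ _; cases fuel <;> rfl
  | cons c rest ih =>
    intro fuel v dp hdeep hlen
    cases fuel with
    | zero => simp at hlen
    | succ f =>
      rw [walkLoop]
      simp only [ge_iff_le, if_pos (hdeep c (by simp))]
      exact ih f v dp (fun x hx => hdeep x (List.mem_cons_of_mem _ hx)) (by simp at hlen ⊢; omega)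

-- fuel accounting: elements of u not yet visited
def capOf (u v : List String) : Nat := u.countP (fun s => !(decide (s ∈ v)))

theorem countP_succ_le {α : Type} (l : List α) (p p' : α → Bool) (x : α)
    (hx : x ∈ l) (hsub : ∀ s, p' s = true → p s = true) (hpx : p x = true)
    (hp'x : p' x = false) : l.countP p' + 1 ≤ l.countP p := by
  induction l with
  | nil => simp at hx
  | cons y l' ih =>
    have hmono : l'.countP p' ≤ l'.countP p := by
      apply List.countP_mono_left
      intro a _ ha
      exact hsub a ha
    rcases List.mem_cons.1 hx with rfl | hx'
    · simp [hpx, hp'x]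
      omega
    · have := ih hx'
      by_cases hy : p' y = true
      · simp [hy, hsub y hy]; omega
      · simp [List.countP_cons, Bool.eq_false_iff.2 hy]
        by_cases hyp : p y = true <;> simp [hyp] <;> omega

theorem capDrop (u : List String) :
    ∀ (Δ v : List String), Δ.Nodup → (∀ x ∈ Δ, x ∈ u ∧ x ∉ v) →
    capOf u (v ++ Δ) + Δ.length ≤ capOf u v := by
  intro Δ
  induction Δ with
  | nil => intro v _ _; simp [capOf]
  | cons x Δ' ih =>
    intro v hnd hmem
    have hx := hmem x (by simp)
    have h1 : capOf u ((v ++ [x]) ++ Δ') + Δ'.length ≤ capOf u (v ++ [x]) := by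
      refine ih (v ++ [x]) (List.nodup_cons.1 hnd).2 ?_
      intro y hy
      refine ⟨(hmem y (List.mem_cons_of_mem _ hy)).1, ?_⟩
      intro hyv
      rcases List.mem_append.1 hyv with h | h
      · exact (hmem y (List.mem_cons_of_mem _ hy)).2 h
      · have hyx : y = x := by simpa using h
        exact (List.nodup_cons.1 hnd).1 (hyx ▸ hy)
    have h2 : capOf u (v ++ [x]) + 1 ≤ capOf u v := by
      apply countP_succ_le u _ _ x hx.1
      · intro s hs
        simp at hs ⊢
        exact hs.1
      · simp [hx.2]
      · simp
    have h3 : (v ++ [x]) ++ Δ' = v ++ (x :: Δ') := by simp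
    rw [h3] at h1
    simp [List.length_cons]
    omega

-- main induction over the remaining number of levels
theorem levelsEq (graph : PvGraph) (md : Int) :
    ∀ (n : Nat) (k : Int) (v : PySem.Set String) (frontier : List String)
      (dp : PySem.Dict String Int) (fuel : Nat),
    0 ≤ k → k + n = max md 0 →
    (∀ x ∈ frontier, x ∈ v ∧ dp.getD x 0 = k) →
    frontier.length + capOf (allDeps graph) v ≤ fuel →
    walkLoop graph md fuel v frontier dp = levelLoop graph n v frontier := by
  intro n
  induction n with
  | zero =>
    intro k v frontier dp fuel hk0 hkn hfr hfuel
    have hkmd : md ≤ k := by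
      rcases max_choice md 0 with h | h <;> rw [h] at hkn <;> omega
    rw [levelLoop]
    apply skipAll
    · intro x hx
      rw [(hfr x hx).2]
      exact hkmd
    · omega
  | succ n ih =>
    intro k v frontier dp fuel hk0 hkn hfr hfuel
    have hklt : k < md := by
      rcases max_choice md 0 with h | h <;> rw [h] at hkn <;> push_cast at hkn <;> omega
    obtain ⟨fuel', hfuel'⟩ : ∃ fuel', fuel = frontier.length + fuel' :=
      ⟨fuel - frontier.length, by omega⟩
    obtain ⟨Δ, dp', hB, hA, hnd, hfr', hdep⟩ :=
      levelStep graph md k hklt frontier fuel' v [] dp hfr (by simp)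
    rw [levelLoop]
    simp only [hB]
    rw [hfuel']
    rw [show frontier ++ ([] : List String) = frontier from by simp] at hA
    rw [hA]
    by_cases hΔ : Δ = []
    · subst hΔ
      simp
      cases fuel' <;> rfl
    · simp only [List.nil_append, if_neg hΔ]
      apply ih (k + 1) (v ++ Δ) Δ dp' fuel'
      · omega
      · push_cast at hkn ⊢; omega
      · intro x hx
        exact ⟨List.mem_append_right _ hx, hdep x (by simpa using hx)⟩
      · have hcap : capOf (allDeps graph) (v ++ Δ) + Δ.length ≤ capOf (allDeps graph) v :=
          capDrop (allDeps graph) Δ v hnd (fun x hx => ⟨(hfr' x hx).2, (hfr' x hx).1⟩)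
        omega

-- {node: 0 for node in affected} answers 0 to every .get(·, 0)
theorem depth0_getD (l : List String) :
    ∀ (d : PySem.Dict String Int), (∀ y, d.getD y 0 = 0) →
    ∀ y, (l.foldl (fun d node => d.insert node (0 : Int)) d).getD y 0 = 0 := by
  induction l with
  | nil => intro d h y; exact h y
  | cons n l' ih =>
    intro d h y
    rw [List.foldl_cons]
    apply ih
    intro z
    rw [PySem.Dict.getD_insert]
    by_cases hz : z = n <;> simp [hz, h]

-- ===== VERDICT (by name: the statement is the Claim_ definition above) =====
theorem walk_graph_spec : Claim_equal_walk_graph := by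
  intro affected graph md _hdom
  unfold Spec_walk_graph walk_graph walk_graph_alt
  by_cases hg : graph = []
  · simp [hg]
  · simp only [hg, if_false]
    apply levelsEq graph md md.toNat 0
    · exact le_refl 0
    · simp
    · intro x hx
      refine ⟨(PySem.Set.mem_ofList _ _).2 hx, ?_⟩
      exact depth0_getD affected PySem.Dict.empty (by intro y; simp [pysem]) x
    · have : capOf (allDeps graph) (PySem.Set.ofList affected) ≤ (allDeps graph).length :=
        List.countP_le_length
      omega
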